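-- pv_equiv track=rewrite | github.com/kenji0011/berong-phase-2 | bfp-simulation-backend/test_simulation.py | make_small_grid
-- ===== SOURCE A (Python) =====
-- def make_small_grid(size=10):
--     """Create a simple grid: walls on edges, free space inside."""
--     grid = []
--     for r in range(size):
--         row = []
--         for c in range(size):
--             if r == 0 or r == size-1 or c == 0 or c == size-1:
--                 row.append(1)  # wall
--             else:
--                 row.append(0)  # free
--         grid.append(row)
--     # Open an exit on the edge
--     grid[0][5] = 0  # top edge exit
--     grid[9][5] = 0  # bottom edge exit
--     return grid
-- ===== SOURCE B (Python) =====
-- def make_small_grid(size=10):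
--     """Create a simple grid: walls on edges, free space inside."""
--     top = [1] * 5 + [0] + [1] * (size - 6)   # top wall row with the exit baked in at column 5
--     interior = [1] + [0] * (size - 2) + [1]  # one wall cell at each end, free in between
--     rows = [top] + [interior[:] for _ in range(size - 2)] + [[1] * size]
--     rows[9][5] = 0  # bottom edge exit (hardcoded row 9)
--     return rows
-- ===== Notes on version B (the rewrite author's own statement) =====
-- stated objective: alternative
-- what changed: B has no per-cell border test and no nested loops: it assembles the grid from row templates built by list concatenation/repetition (a top wall row with the exit at column 5 baked in, a repeated interior row, a bottom wall row), keeping only the hardcoded rows[9][5]=0 bottom-exit write.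
import Mathlib
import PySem

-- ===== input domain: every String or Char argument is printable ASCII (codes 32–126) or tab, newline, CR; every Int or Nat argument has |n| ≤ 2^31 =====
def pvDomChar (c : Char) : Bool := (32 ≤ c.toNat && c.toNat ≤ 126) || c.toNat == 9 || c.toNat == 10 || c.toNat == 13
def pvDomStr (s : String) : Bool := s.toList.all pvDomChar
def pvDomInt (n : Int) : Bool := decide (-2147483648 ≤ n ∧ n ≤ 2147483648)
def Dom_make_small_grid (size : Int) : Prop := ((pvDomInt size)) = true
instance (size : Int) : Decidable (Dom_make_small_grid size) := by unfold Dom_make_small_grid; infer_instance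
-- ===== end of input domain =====

-- B assembles the grid from row templates built by concatenation/repetition (top exit baked
-- into its template, repeated interior row, bottom wall row) instead of a per-cell border
-- test inside nested loops (objective: alternative decomposition, same cost).


-- ===== PORT A =====
-- primitive mirroring the Python statement `g[r][c] = v` (nonnegative literal indices)
def pvSetCell (g : List (List Int)) (r c : Nat) (v : Int) : List (List Int) :=
  g.set r ((g.getD r []).set c v)

def make_small_grid (size : Int) : List (List Int) :=
  let grid := (PySem.List.pyRange 0 size 1).foldl (fun grid r =>
    grid ++ [(PySem.List.pyRange 0 size 1).foldl (fun row c =>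
      row ++ [if r = 0 ∨ r = size - 1 ∨ c = 0 ∨ c = size - 1 then (1 : Int) else 0]) []]) []
  let grid := pvSetCell grid 0 5 0   -- grid[0][5] = 0
  pvSetCell grid 9 5 0               -- grid[9][5] = 0

-- ===== PORT B =====
def make_small_grid_alt (size : Int) : List (List Int) :=
  let n := size.toNat
  let top := List.replicate 5 (1 : Int) ++ [0] ++ List.replicate (n - 6) 1   -- [1]*5 + [0] + [1]*(size-6)
  let interior := [(1 : Int)] ++ List.replicate (n - 2) 0 ++ [1]             -- [1] + [0]*(size-2) + [1]
  let rows := [top] ++ List.replicate (n - 2) interior ++ [List.replicate n 1]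
  pvSetCell rows 9 5 0               -- rows[9][5] = 0

-- ===== PRECONDITION & SPEC =====
-- Both programs' behaviour is claimed only for size ≥ 10: A raises IndexError (grid[9][5]) for smaller sizes.
def Pre_make_small_grid (size : Int) : Prop := 10 ≤ size
instance (size : Int) : Decidable (Pre_make_small_grid size) := by unfold Pre_make_small_grid; infer_instance
def pvWitness_make_small_grid : Int := 10

def Spec_make_small_grid (size : Int) (out : List (List Int)) : Prop := out = make_small_grid_alt size
instance (size : Int) (out : List (List Int)) : Decidable (Spec_make_small_grid size out) := by unfold Spec_make_small_grid; infer_instance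

-- ===== CLAIM (what is proved, stated in full; the proofs are below) =====
def Claim_equal_make_small_grid : Prop := ∀ (size : Int), Dom_make_small_grid size → Pre_make_small_grid size → Spec_make_small_grid size (make_small_grid size)

-- ===== LEMMAS AND PROOFS =====

-- helper facts about set/getD on replicate-append lists, and row characterisations

lemma pv_getD_rep {A : Type} (m k : Nat) (a d : A) (l : List A) (hk : k < m) :
    (List.replicate m a ++ l).getD k d = a := by
  rw [List.getD_eq_getElem _ _ (by simp; omega)]
  rw [List.getElem_append_left (by simp [hk])]
  exact List.getElem_replicate ..

lemma pv_set_rep {A : Type} (m k : Nat) (a : A) (l : List A) (hk : k < m) :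
    (List.replicate m a ++ l).set k a = List.replicate m a ++ l := by
  apply List.ext_getElem
  · simp
  · intro j hj1 hj2
    simp only [List.getElem_set]
    split_ifs with hkj
    · subst hkj; rw [List.getElem_append_left (by simp [hk]), List.getElem_replicate]
    · rfl

lemma pv_sandwich_get {A : Type} (n j : Nat) (hn : 2 ≤ n) (hj : j < n) (w i : A) :
    (([w] ++ List.replicate (n - 2) i ++ [w])[j]'(by simp; omega)) =
      if j = 0 ∨ j = n - 1 then w else i := by
  have e : [w] ++ List.replicate (n - 2) i ++ [w] = w :: (List.replicate (n - 2) i ++ [w]) := rfl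
  rcases Nat.eq_zero_or_pos j with rfl | hjpos
  · simp
  · obtain ⟨k, rfl⟩ : ∃ k, j = k + 1 := ⟨j - 1, by omega⟩
    simp only [e, List.getElem_cons_succ]
    by_cases hlast : k + 1 = n - 1
    · rw [List.getElem_append_right (by simp; omega)]
      simp only [List.length_replicate]
      rw [if_pos (Or.inr hlast)]
      simp
    · rw [List.getElem_append_left (by simp; omega), List.getElem_replicate,
        if_neg (by omega)]

lemma pv_row (n : Nat) (h : 10 ≤ n) (r : Int) :
    List.map (fun c => if r = 0 ∨ r = (n : Int) - 1 ∨ c = 0 ∨ c = (n : Int) - 1 then (1 : Int) else 0)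
      (PySem.List.pyRange 0 (n : Int)) =
    if r = 0 ∨ r = (n : Int) - 1 then List.replicate n 1
    else [1] ++ List.replicate (n - 2) 0 ++ [1] := by
  apply List.ext_getElem
  · simp [PySem.List.length_pyRange_one]; split_ifs <;> simp <;> try omega
  · intro j hj1 hj2
    simp only [List.length_map, PySem.List.length_pyRange_one, Int.sub_zero,
      Int.toNat_natCast] at hj1
    simp only [List.getElem_map, PySem.List.getElem_pyRange_one]
    by_cases hr : r = 0 ∨ r = (n : Int) - 1
    · simp only [if_pos hr, List.getElem_replicate]
      rw [if_pos (hr.elim (fun h0 => Or.inl h0) (fun h1 => Or.inr (Or.inl h1)))]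
    · simp only [if_neg hr, pv_sandwich_get n j (by omega : 2 ≤ n) hj1]
      rcases not_or.mp hr with ⟨hr0, hr1⟩
      split_ifs <;> (first | rfl | omega)

lemma pv_outer {A : Type} (n : Nat) (h : 2 ≤ n) (W I : List A) :
    List.map (fun r => if r = 0 ∨ r = (n : Int) - 1 then W else I)
      (PySem.List.pyRange 0 (n : Int)) =
    [W] ++ List.replicate (n - 2) I ++ [W] := by
  apply List.ext_getElem
  · simp [PySem.List.length_pyRange_one]; omega
  · intro j hj1 hj2
    simp only [List.length_map, PySem.List.length_pyRange_one, Int.sub_zero,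
      Int.toNat_natCast] at hj1
    simp only [List.getElem_map, PySem.List.getElem_pyRange_one]
    simp only [pv_sandwich_get n j h hj1]
    split_ifs <;> (first | rfl | omega)

lemma pv_set5_wall (n : Nat) (h : 10 ≤ n) :
    (List.replicate n (1 : Int)).set 5 0 =
      List.replicate 5 1 ++ [0] ++ List.replicate (n - 6) 1 := by
  obtain ⟨m, rfl⟩ : ∃ m, n = 10 + m := ⟨n - 10, by omega⟩
  rw [show 10 + m - 6 = 4 + m from by omega, List.replicate_add, List.replicate_add]
  rfl

lemma pv_set5_interior (n : Nat) (h : 11 ≤ n) :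
    ([1] ++ List.replicate (n - 2) (0 : Int) ++ [1]).set 5 0 =
      [1] ++ List.replicate (n - 2) 0 ++ [1] := by
  have e : ([1] ++ List.replicate (n - 2) (0 : Int) ++ [1]).set 5 0
      = 1 :: (List.replicate (n - 2) (0 : Int) ++ [1]).set 4 0 := rfl
  rw [e, pv_set_rep (n - 2) 4 0 [1] (by omega)]
  rfl

lemma pv_getD0 {A : Type} (a d : A) (l1 l2 : List A) : (([a] ++ l1) ++ l2).getD 0 d = a := rfl

lemma pv_set0 {A : Type} (a b : A) (l1 l2 : List A) :
    (([a] ++ l1) ++ l2).set 0 b = ([b] ++ l1) ++ l2 := rfl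

lemma pv_getD9 {A : Type} (a d : A) (l1 l2 : List A) :
    (([a] ++ l1) ++ l2).getD 9 d = (l1 ++ l2).getD 8 d := rfl

lemma pv_set9 {A : Type} (a b : A) (l1 l2 : List A) :
    (([a] ++ l1) ++ l2).set 9 b = [a] ++ (l1 ++ l2).set 8 b := rfl

lemma pv_eq (n : Nat) (h : 10 ≤ n) : make_small_grid (n : Int) = make_small_grid_alt (n : Int) := by
  by_cases h10 : n = 10
  · subst h10; decide
  · have h11 : 11 ≤ n := by omega
    unfold make_small_grid make_small_grid_alt pvSetCell
    simp only [PySem.List.foldl_append_singleton_eq_map, List.nil_append, Int.toNat_natCast]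
    simp only [pv_row n h, pv_outer n (by omega)]
    simp only [pv_getD0, pv_set0, pv_getD9, pv_set9]
    rw [pv_getD_rep (n - 2) 8 _ [] _ (by omega), pv_set5_interior n h11,
      pv_set_rep (n - 2) 8 _ _ (by omega), pv_set5_wall n h]
-- ===== VERDICT (by name: the statement is the Claim_ definition above) =====
theorem make_small_grid_spec : Claim_equal_make_small_grid := by
  intro size hdom hpre
  obtain ⟨n, rfl⟩ : ∃ n : Nat, size = (n : Int) := ⟨size.toNat, by unfold Pre_make_small_grid at hpre; omega⟩
  unfold Pre_make_small_grid at hpre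
  have hn : 10 ≤ n := by exact_mod_cast hpre
  exact pv_eq n hn
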